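-- pv_equiv track=rewrite | github.com/cyph3rasi/kyber | kyber/agent/orchestrator.py | _looks_like_telemetry_block
-- ===== SOURCE A (Python) =====
-- def _looks_like_telemetry_block(text: str) -> bool:
--     """Detect if text is likely the raw telemetry template."""
--     if not text:
--         return False
--     lines = [line.strip().lower() for line in text.splitlines() if line.strip()]
--     if not lines:
--         return False
--     telemetry_markers = [
--         "task:", "reference:", "status:", "created:", "started:",
--         "elapsed:", "current action:", "execution phases:", "step:",
--         "recent command/activity trace:", "failure signal:", "outcome:",
--     ]
--     marker_hits = sum(1 for line in lines for m in telemetry_markers if line.startswith(m))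
--     if marker_hits >= 3:
--         return True
--     return False
-- ===== SOURCE B (Python) =====
-- _MARKERS = frozenset({
--     "task:", "reference:", "status:", "created:", "started:",
--     "elapsed:", "current action:", "execution phases:", "step:",
--     "recent command/activity trace:", "failure signal:", "outcome:",
-- })
--
--
-- def _looks_like_telemetry_block(text: str) -> bool:
--     """Detect if text is likely the raw telemetry template."""
--     hits = 0
--     for raw in text.splitlines():
--         line = raw.strip().lower()
--         if not line:
--             continue
--         head, sep, _ = line.partition(':')
--         if sep and head + ':' in _MARKERS:
--             hits += 1
--             if hits == 3:
--                 return True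
--     return False
-- ===== Notes on version B (the rewrite author's own statement) =====
-- stated objective: alternative
-- what changed: Instead of testing each line against all 12 markers with startswith, B derives the line's pre-colon key via partition and does a single membership test in a frozenset of markers, with an early return once 3 hits are counted.
import Mathlib
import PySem

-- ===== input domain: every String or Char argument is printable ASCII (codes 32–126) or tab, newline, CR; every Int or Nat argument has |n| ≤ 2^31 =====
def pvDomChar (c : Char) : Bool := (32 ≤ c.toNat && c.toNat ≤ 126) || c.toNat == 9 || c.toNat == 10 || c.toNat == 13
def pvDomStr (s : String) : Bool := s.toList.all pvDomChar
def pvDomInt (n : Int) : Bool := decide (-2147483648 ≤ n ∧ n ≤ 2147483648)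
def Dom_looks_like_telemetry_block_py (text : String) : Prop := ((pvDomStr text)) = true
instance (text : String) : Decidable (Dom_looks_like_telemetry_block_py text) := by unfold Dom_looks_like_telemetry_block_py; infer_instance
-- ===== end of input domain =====

-- B replaces A's 12-marker startswith scan per line by one membership test of the line's
-- pre-colon key in a marker set, with an early exit at 3 hits (objective: alternative).

-- ===== PORT A =====
def pvTelemetryMarkers : List String :=
  ["task:", "reference:", "status:", "created:", "started:",
   "elapsed:", "current action:", "execution phases:", "step:",
   "recent command/activity trace:", "failure signal:", "outcome:"]

def looks_like_telemetry_block_py (text : String) : Bool :=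
  if text = "" then false
  else
    let lines := ((PySem.Str.splitlines text).filter (fun line => PySem.Str.strip line != "")).map
      (fun line => PySem.Str.lower (PySem.Str.strip line))
    if lines = [] then false
    else
      let marker_hits := (lines.map (fun line =>
        pvTelemetryMarkers.countP (fun m => PySem.Str.startswith line m))).sum
      if 3 ≤ marker_hits then true else false

-- ===== PORT B =====
def pvMarkerSet : List (List Char) :=
  ["task:".toList, "reference:".toList, "status:".toList, "created:".toList, "started:".toList,
   "elapsed:".toList, "current action:".toList, "execution phases:".toList, "step:".toList,
   "recent command/activity trace:".toList, "failure signal:".toList, "outcome:".toList]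

def pvAltLoop : List String → Nat → Bool
  | [], _ => false
  | raw :: rest, hits =>
    let line := PySem.Chars.lower (PySem.Chars.strip raw.toList)
    if line = [] then pvAltLoop rest hits
    else
      -- line.partition(':') ported by hand (exact for the 1-char separator):
      -- head = chars before the first ':', sep is nonempty iff ':' occurs in line
      let head := line.takeWhile (· ≠ ':')
      if line.contains ':' && pvMarkerSet.contains (head ++ [':']) then
        if hits + 1 == 3 then true else pvAltLoop rest (hits + 1)
      else pvAltLoop rest hits

def looks_like_telemetry_block_py_alt (text : String) : Bool :=
  pvAltLoop (PySem.Str.splitlines text) 0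

-- ===== PRECONDITION & SPEC =====
def Spec_looks_like_telemetry_block_py (text : String) (out : Bool) : Prop := out = looks_like_telemetry_block_py_alt text
instance (text : String) (out : Bool) : Decidable (Spec_looks_like_telemetry_block_py text out) := by unfold Spec_looks_like_telemetry_block_py; infer_instance

-- ===== CLAIM (what is proved, stated in full; the proofs are below) =====
def Claim_equal_looks_like_telemetry_block_py : Prop := ∀ (text : String), Dom_looks_like_telemetry_block_py text → Spec_looks_like_telemetry_block_py text (looks_like_telemetry_block_py text)

-- ===== LEMMAS AND PROOFS =====

-- the marker heads (markers without the final colon)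
def pvHeads : List (List Char) :=
  ["task".toList, "reference".toList, "status".toList, "created".toList, "started".toList,
   "elapsed".toList, "current action".toList, "execution phases".toList, "step".toList,
   "recent command/activity trace".toList, "failure signal".toList, "outcome".toList]

-- does a raw line (after strip+lower) contribute one hit?
def pvLineHit (raw : String) : Bool :=
  let cs := PySem.Chars.lower (PySem.Chars.strip raw.toList)
  cs.contains ':' && pvMarkerSet.contains (cs.takeWhile (· ≠ ':') ++ [':'])

theorem pv_drop_head_false (p : Char → Bool) (l : List Char) (a : Char) (t : List Char)
    (h : l.dropWhile p = a :: t) : p a = false := by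
  have := List.head_dropWhile_not p (l := l) (by rw [h]; simp)
  simp only [h, List.head_cons] at this
  exact this

theorem pv_pfx_iff (cs ms : List Char) (h : ':' ∉ ms) :
    (ms ++ [':']) <+: cs ↔ (':' ∈ cs ∧ cs.takeWhile (· ≠ ':') = ms) := by
  constructor
  · rintro ⟨t, rfl⟩
    refine ⟨by simp, ?_⟩
    rw [List.append_assoc]
    rw [List.takeWhile_append_of_pos (by intro a ha; simp; rintro rfl; exact h ha)]
    simp
  · rintro ⟨hmem, rfl⟩
    have hne : cs.dropWhile (· ≠ ':') ≠ [] := by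
      rw [Ne, List.dropWhile_eq_nil_iff]
      intro hall
      exact absurd (hall ':' hmem) (by simp)
    obtain ⟨a, t, hdrop⟩ := List.exists_cons_of_ne_nil hne
    have ha : a = ':' := by
      have := pv_drop_head_false (· ≠ ':') cs a t hdrop
      simpa using this
    refine ⟨t, ?_⟩
    conv_rhs => rw [← List.takeWhile_append_dropWhile (p := (· ≠ ':')) (l := cs)]
    rw [List.append_assoc, hdrop, ha]
    rfl

theorem pv_sw_eq (cs ms : List Char) (h : ':' ∉ ms) :
    PySem.Chars.startswith cs (ms ++ [':']) =
      (cs.contains ':' && (cs.takeWhile (· ≠ ':') == ms)) := by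
  rw [Bool.eq_iff_iff, PySem.Chars.startswith_iff, pv_pfx_iff cs ms h]
  simp

-- the per-line equivalence: A's 12-marker count is B's single membership indicator
theorem pv_count_eq (cs : List Char) :
    pvTelemetryMarkers.countP (fun m => PySem.Chars.startswith cs m.toList)
      = if cs.contains ':' && pvMarkerSet.contains (cs.takeWhile (· ≠ ':') ++ [':'])
        then 1 else 0 := by
  have hA : pvTelemetryMarkers.map (fun m => m.toList) = pvHeads.map (· ++ [':']) := by decide
  have hSet : pvMarkerSet = pvHeads.map (· ++ [':']) := by decide
  have hnd : pvHeads.Nodup := by decide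
  have hnc : ∀ ms ∈ pvHeads, ':' ∉ ms := by decide
  have h1 : pvTelemetryMarkers.countP (fun m => PySem.Chars.startswith cs m.toList)
      = pvHeads.countP (fun ms => PySem.Chars.startswith cs (ms ++ [':'])) := by
    rw [show (fun m : String => PySem.Chars.startswith cs m.toList)
          = ((fun t => PySem.Chars.startswith cs t) ∘ (fun m : String => m.toList)) from rfl,
        ← List.countP_map, hA, List.countP_map]
    rfl
  rw [h1, List.countP_congr (fun ms hms => by rw [pv_sw_eq cs ms (hnc ms hms)]), hSet]
  cases hc : cs.contains ':' with
  | false => simp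
  | true =>
    have hmem : (pvHeads.map (· ++ [':'])).contains (cs.takeWhile (· ≠ ':') ++ [':'])
        = pvHeads.contains (cs.takeWhile (· ≠ ':')) := by
      rw [Bool.eq_iff_iff]; simp
    simp only [Bool.true_and, hmem]
    have h2 : pvHeads.countP (fun ms => cs.takeWhile (· ≠ ':') == ms)
        = pvHeads.count (cs.takeWhile (· ≠ ':')) := by
      rw [List.count_eq_countP]
      exact List.countP_congr (fun ms _ => by rw [Bool.beq_comm])
    rw [h2]
    cases hmem2 : pvHeads.contains (cs.takeWhile (· ≠ ':')) with
    | false =>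
      rw [if_neg (by simp), List.count_eq_zero]
      simpa using hmem2
    | true =>
      rw [if_pos rfl]
      exact List.count_eq_one_of_mem hnd (by simpa using hmem2)

-- A's total marker count over the raw lines
theorem pv_sum_eq (raws : List String) :
    (((raws.filter (fun line => PySem.Str.strip line != "")).map
        (fun line => PySem.Str.lower (PySem.Str.strip line))).map (fun line =>
        pvTelemetryMarkers.countP (fun m => PySem.Str.startswith line m))).sum
      = raws.countP pvLineHit := by
  induction raws with
  | nil => simp
  | cons raw rest ih =>
    cases hp : (PySem.Str.strip raw != "") with
    | false =>
      have hs : PySem.Str.strip raw = "" := by simpa using hp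
      have hnil : PySem.Chars.strip raw.toList = [] := by
        rw [← PySem.Str.toList_strip, hs]; rfl
      have hhit : pvLineHit raw = false := by
        unfold pvLineHit
        simp [hnil, PySem.Chars.lower]
      simp only [List.filter_cons, hp, Bool.false_eq_true, if_false, List.countP_cons, hhit,
        Nat.add_zero]
      exact ih
    | true =>
      have hline : (PySem.Str.lower (PySem.Str.strip raw)).toList
          = PySem.Chars.lower (PySem.Chars.strip raw.toList) := by simp
      have hf : pvTelemetryMarkers.countP
            (fun m => PySem.Str.startswith (PySem.Str.lower (PySem.Str.strip raw)) m)
          = if pvLineHit raw then 1 else 0 := by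
        have hcnt := pv_count_eq (PySem.Chars.lower (PySem.Chars.strip raw.toList))
        unfold pvLineHit
        simp only [PySem.Str.startswith_eq, hline]
        exact hcnt
      simp only [List.filter_cons, hp, if_true, List.map_cons, List.sum_cons, List.countP_cons]
      rw [hf, ih, Nat.add_comm]

-- B's early-exit loop decides the threshold on the same count
theorem pv_loop_eq (raws : List String) (hits : Nat) (h : hits < 3) :
    pvAltLoop raws hits = decide (3 ≤ hits + raws.countP pvLineHit) := by
  induction raws generalizing hits with
  | nil =>
    simp only [pvAltLoop, List.countP_nil, Nat.add_zero]
    symm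
    simpa using by omega
  | cons raw rest ih =>
    simp only [pvAltLoop, List.countP_cons]
    by_cases hl : PySem.Chars.lower (PySem.Chars.strip raw.toList) = []
    · have hhit : pvLineHit raw = false := by
        unfold pvLineHit
        simp [hl]
      rw [if_pos hl, hhit, ih hits h]
      simp
    · rw [if_neg hl]
      have hcond : ((PySem.Chars.lower (PySem.Chars.strip raw.toList)).contains ':'
            && pvMarkerSet.contains
              ((PySem.Chars.lower (PySem.Chars.strip raw.toList)).takeWhile (· ≠ ':') ++ [':']))
          = pvLineHit raw := rfl
      rw [hcond]
      cases hhit : pvLineHit raw with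
      | false =>
        rw [ih hits h]
        simp
      | true =>
        rw [if_pos rfl]
        cases h3 : (hits + 1 == 3) with
        | true =>
          have h3' : hits + 1 = 3 := by simpa using h3
          symm
          simpa using by omega
        | false =>
          have hne : hits + 1 ≠ 3 := by simpa using h3
          rw [if_neg (by simp), ih (hits + 1) (by omega), decide_eq_decide]
          simpa using by omega

-- ===== VERDICT (by name: the statement is the Claim_ definition above) =====
theorem looks_like_telemetry_block_py_spec : Claim_equal_looks_like_telemetry_block_py := by
  intro text _
  show looks_like_telemetry_block_py text = looks_like_telemetry_block_py_alt text
  have hB : looks_like_telemetry_block_py_alt text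
      = decide (3 ≤ (PySem.Str.splitlines text).countP pvLineHit) := by
    unfold looks_like_telemetry_block_py_alt
    rw [pv_loop_eq _ 0 (by omega), Nat.zero_add]
  rw [hB]
  unfold looks_like_telemetry_block_py
  by_cases ht : text = ""
  · rw [if_pos ht, ht]
    decide
  · rw [if_neg ht]
    dsimp only
    have hsum := pv_sum_eq (PySem.Str.splitlines text)
    by_cases hl : ((PySem.Str.splitlines text).filter
        (fun line => PySem.Str.strip line != "")).map
        (fun line => PySem.Str.lower (PySem.Str.strip line)) = []
    · rw [if_pos hl, ← hsum, hl]
      simp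
    · rw [if_neg hl, ← hsum]
      split_ifs with h3
      · exact (decide_eq_true h3).symm
      · exact (decide_eq_false h3).symm
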